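-- pv_equiv track=rewrite | github.com/clauseb-ab/Algoritmos-EPM-SAV-AH | constructivo_bvns.py | calculate_errors_local
-- ===== SOURCE A (Python) =====
-- def calculate_errors_local(pi, adj_matrix, x):
--     """ Calcular el error solo para un vértice específico """
--     n = len(pi)
--     sum_ = 0
--     neg = 0  # contador aristas negativas
--     pos = 0  # contador aristas positivas
--
--     # Exploración hacia la derecha
--     for y in range(x + 1, n):
--         if adj_matrix[pi[x]][pi[y]] == 1:
--             if neg > 0:
--                 pos += 1
--         elif adj_matrix[pi[x]][pi[y]] == -1:
--             if neg == 0: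
--                 neg = 1
--             else:
--                 sum_ += neg * pos
--                 neg += 1
--                 pos = 0
--
--     if neg > 0 and pos > 0:
--         sum_ += neg * pos
--
--     # Exploración hacia la izquierda
--     neg = 0
--     pos = 0
--     for z in reversed(range(x)):
--         if adj_matrix[pi[x]][pi[z]] == 1:
--             if neg > 0:
--                 pos += 1
--         elif adj_matrix[pi[x]][pi[z]] == -1:
--             if neg == 0:
--                 neg = 1
--             else:
--                 sum_ += neg * pos
--                 neg += 1
--                 pos = 0
--
--     if neg > 0 and pos > 0:
--         sum_ += neg * pos
--
--     return sum_
-- ===== SOURCE B (Python) =====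
-- def _pairs(seq):
--     """Number of ordered (-1, +1) pairs in seq: one reversed scan that carries
--     the count of +1 edges seen so far (to the right), added at each -1."""
--     total = 0
--     pos = 0
--     for e in reversed(seq):
--         if e == 1:
--             pos += 1
--         elif e == -1:
--             total += pos
--     return total
--
--
-- def calculate_errors_local(pi, adj_matrix, x):
--     """Same value as A: the error equals, per direction, the number of ordered
--     (negative edge, positive edge) pairs along the scan order."""
--     n = len(pi)
--     right = [adj_matrix[pi[x]][pi[y]] for y in range(x + 1, n)]
--     left = [adj_matrix[pi[x]][pi[z]] for z in reversed(range(x))]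
--     return _pairs(right) + _pairs(left)
-- ===== Notes on version B (the rewrite author's own statement) =====
-- stated objective: alternative
-- what changed: Replaces A's forward block state machine (neg/pos counters with neg*pos products flushed in-loop and at pass end) by materialising each direction's edge list and counting ordered (-1,+1) pairs with one reversed scan that carries only a running count of +1 edges, added at each -1.
import Mathlib
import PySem

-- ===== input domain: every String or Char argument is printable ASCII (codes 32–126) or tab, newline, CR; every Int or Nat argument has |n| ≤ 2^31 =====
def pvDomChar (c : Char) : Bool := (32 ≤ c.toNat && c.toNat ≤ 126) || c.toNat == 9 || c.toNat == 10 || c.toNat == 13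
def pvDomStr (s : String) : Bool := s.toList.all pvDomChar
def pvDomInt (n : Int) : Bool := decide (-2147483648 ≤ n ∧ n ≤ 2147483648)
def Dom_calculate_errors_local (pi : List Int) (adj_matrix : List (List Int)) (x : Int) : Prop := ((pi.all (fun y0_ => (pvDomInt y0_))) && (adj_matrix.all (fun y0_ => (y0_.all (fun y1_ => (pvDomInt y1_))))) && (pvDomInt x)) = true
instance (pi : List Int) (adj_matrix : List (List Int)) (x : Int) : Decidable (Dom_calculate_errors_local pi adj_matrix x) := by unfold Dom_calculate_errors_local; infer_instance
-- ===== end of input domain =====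

-- B replaces A's forward block state machine (neg/pos counters, neg*pos flushes) by
-- materialising each direction's edge list and counting ordered (-1,+1) pairs with one
-- reversed scan carrying a count of +1 edges; same O(n), simpler.


-- shared indexing helper: adj_matrix[pi[x]][pi[y]] with Python index semantics
def pvEdge (pi : List Int) (adj_matrix : List (List Int)) (x y : Int) : Int :=
  PySem.List.pyGetD (PySem.List.pyGetD adj_matrix (PySem.List.pyGetD pi x 0) []) (PySem.List.pyGetD pi y 0) 0

-- ===== PORT A =====
-- A's loop body on state (sum_, neg, pos)
def pvStepA (e : Int) (s : Int × Int × Int) : Int × Int × Int :=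
  if e = 1 then
    (s.1, s.2.1, if s.2.1 > 0 then s.2.2 + 1 else s.2.2)
  else if e = -1 then
    (if s.2.1 = 0 then (s.1, 1, s.2.2) else (s.1 + s.2.1 * s.2.2, s.2.1 + 1, 0))
  else s

-- A's end-of-pass flush: if neg > 0 and pos > 0 then sum_ += neg * pos
def pvFlushA (s : Int × Int × Int) : Int :=
  if s.2.1 > 0 ∧ s.2.2 > 0 then s.1 + s.2.1 * s.2.2 else s.1

def calculate_errors_local (pi : List Int) (adj_matrix : List (List Int)) (x : Int) : Int :=
  let n : Int := pi.length
  let s1 := (PySem.List.pyRange (x + 1) n 1).foldl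
              (fun s y => pvStepA (pvEdge pi adj_matrix x y) s) (0, 0, 0)
  let sum1 := pvFlushA s1
  -- reversed(range(x)) = x-1, x-2, …, 0
  let s2 := (PySem.List.pyRange (x - 1) (-1) (-1)).foldl
              (fun s z => pvStepA (pvEdge pi adj_matrix x z) s) (sum1, 0, 0)
  pvFlushA s2

-- ===== PORT B =====
-- _pairs(seq): reversed scan; pos = count of +1 seen so far, added at each -1
def pvPairsScan (seq : List Int) : Int :=
  (seq.reverse.foldl
    (fun (s : Int × Int) e =>
      if e = 1 then (s.1, s.2 + 1)
      else if e = -1 then (s.1 + s.2, s.2)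
      else s) (0, 0)).1

def calculate_errors_local_alt (pi : List Int) (adj_matrix : List (List Int)) (x : Int) : Int :=
  let n : Int := pi.length
  let right := (PySem.List.pyRange (x + 1) n 1).map (fun y => pvEdge pi adj_matrix x y)
  let left := (PySem.List.pyRange (x - 1) (-1) (-1)).map (fun z => pvEdge pi adj_matrix x z)
  pvPairsScan right + pvPairsScan left

-- ===== PRECONDITION & SPEC =====
-- Exactly where A returns (no exception): either both scan ranges are empty, or x is a
-- valid (possibly negative, Python-wrap) index of pi, pi[x] a valid index into adj_matrix,
-- and for every scanned position y the entry pi[y] is a valid index into row adj_matrix[pi[x]].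
def Pre_calculate_errors_local (pi : List Int) (adj_matrix : List (List Int)) (x : Int) : Prop :=
  let n : Int := pi.length
  (n ≤ x + 1 ∧ x ≤ 0) ∨
  ((-n ≤ x ∧ x < n) ∧
   (-(adj_matrix.length : Int) ≤ PySem.List.pyGetD pi x 0 ∧
     PySem.List.pyGetD pi x 0 < adj_matrix.length) ∧
   ∀ y ∈ PySem.List.pyRange (x + 1) n 1 ++ PySem.List.pyRange (x - 1) (-1) (-1),
     -(((PySem.List.pyGetD adj_matrix (PySem.List.pyGetD pi x 0) []).length : Int)) ≤
         PySem.List.pyGetD pi y 0 ∧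
       PySem.List.pyGetD pi y 0 <
         ((PySem.List.pyGetD adj_matrix (PySem.List.pyGetD pi x 0) []).length : Int))

instance (pi : List Int) (adj_matrix : List (List Int)) (x : Int) : Decidable (Pre_calculate_errors_local pi adj_matrix x) := by
  unfold Pre_calculate_errors_local; infer_instance

def pvWitness_calculate_errors_local : List Int × List (List Int) × Int :=
  ([1, 0, 2], [[0, -1, 1], [-1, 0, 1], [1, 1, 0]], 1)

def Spec_calculate_errors_local (pi : List Int) (adj_matrix : List (List Int)) (x : Int) (out : Int) : Prop := out = calculate_errors_local_alt pi adj_matrix x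
instance (pi : List Int) (adj_matrix : List (List Int)) (x : Int) (out : Int) : Decidable (Spec_calculate_errors_local pi adj_matrix x out) := by unfold Spec_calculate_errors_local; infer_instance

-- ===== CLAIM (what is proved, stated in full; the proofs are below) =====
def Claim_equal_calculate_errors_local : Prop := ∀ (pi : List Int) (adj_matrix : List (List Int)) (x : Int), Dom_calculate_errors_local pi adj_matrix x → Pre_calculate_errors_local pi adj_matrix x → Spec_calculate_errors_local pi adj_matrix x (calculate_errors_local pi adj_matrix x)

-- ===== LEMMAS AND PROOFS =====

-- spec functions: number of +1 entries, and of ordered (-1, +1) pairs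
def pvCnt1 : List Int → Int
  | [] => 0
  | e :: t => (if e = 1 then 1 else 0) + pvCnt1 t

def pvP : List Int → Int
  | [] => 0
  | e :: t => (if e = -1 then pvCnt1 t else 0) + pvP t

-- B side: the reversed scan computes (pvP seq, pvCnt1 seq)
lemma pvScan_eq (seq : List Int) :
    seq.reverse.foldl
      (fun (s : Int × Int) e =>
        if e = 1 then (s.1, s.2 + 1)
        else if e = -1 then (s.1 + s.2, s.2)
        else s) (0, 0) = (pvP seq, pvCnt1 seq) := by
  rw [List.foldl_reverse]
  induction seq with
  | nil => simp [pvP, pvCnt1]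
  | cons e t ih =>
      simp only [List.foldr_cons, ih, pvP, pvCnt1]
      split_ifs with h1 h2 <;> simp_all <;> ring

lemma pvPairsScan_eq (seq : List Int) : pvPairsScan seq = pvP seq := by
  unfold pvPairsScan; rw [pvScan_eq]

-- A side, via the intermediate single-counter machine
def pvStepB (e : Int) (s : Int × Int) : Int × Int :=
  if e = -1 then (s.1, s.2 + 1)
  else if e = 1 then (s.1 + s.2, s.2)
  else s

-- coupling invariant between A's state (sum_, neg, pos) and machine state (total, neg)
def pvInv (a : Int × Int × Int) (b : Int × Int) : Prop :=
  0 ≤ a.2.1 ∧ 0 ≤ a.2.2 ∧ a.1 + a.2.1 * a.2.2 = b.1 ∧ a.2.1 = b.2 ∧ (a.2.1 = 0 → a.2.2 = 0)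

lemma pvStep_inv (e : Int) (a : Int × Int × Int) (b : Int × Int) (h : pvInv a b) :
    pvInv (pvStepA e a) (pvStepB e b) := by
  obtain ⟨a1, a2, a3⟩ := a
  obtain ⟨b1, b2⟩ := b
  obtain ⟨h1, h2, h3, h4, h5⟩ := h
  simp only [pvInv, pvStepA, pvStepB] at *
  subst h4
  split_ifs <;> dsimp only at * <;>
    refine ⟨by omega, by omega, by (try simp_all) <;> nlinarith, by omega, by omega⟩

lemma pvFold_inv (l : List Int) (a : Int × Int × Int) (b : Int × Int) (h : pvInv a b) :
    pvInv (l.foldl (fun s e => pvStepA e s) a) (l.foldl (fun s e => pvStepB e s) b) := by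
  induction l generalizing a b with
  | nil => exact h
  | cons e t ih => exact ih _ _ (pvStep_inv e a b h)

lemma pvFlush_eq (a : Int × Int × Int) (b : Int × Int) (h : pvInv a b) : pvFlushA a = b.1 := by
  obtain ⟨a1, a2, a3⟩ := a
  obtain ⟨h1, h2, h3, h4, h5⟩ := h
  simp only [pvFlushA] at *
  split_ifs with hc
  · exact h3
  · rcases lt_or_eq_of_le h1 with hp | hz
    · have : a3 = 0 := by
        rcases lt_or_eq_of_le h2 with hp2 | hz2
        · exact absurd ⟨hp, hp2⟩ hc
        · omega
      nlinarith
    · have := h5 hz.symm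
      nlinarith

-- count of -1 entries (second component of the machine)
def pvNeg : List Int → Int
  | [] => 0
  | e :: t => (if e = -1 then 1 else 0) + pvNeg t

-- the single-counter machine from (t, c) computes t + c·cnt1 + pvP
lemma pvFoldB_eq (l : List Int) (t c : Int) :
    l.foldl (fun s e => pvStepB e s) (t, c) = (t + c * pvCnt1 l + pvP l, c + pvNeg l) := by
  induction l generalizing t c with
  | nil => simp [pvCnt1, pvP, pvNeg]
  | cons e t' ih =>
      rw [List.foldl_cons]
      by_cases h1 : e = -1
      · rw [show pvStepB e (t, c) = (t, c + 1) by simp [pvStepB, h1], ih]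
        simp only [pvCnt1, pvP, pvNeg, h1]
        norm_num [Prod.ext_iff]
        constructor <;> ring
      · by_cases h2 : e = 1
        · rw [show pvStepB e (t, c) = (t + c, c) by simp [pvStepB, h2], ih]
          simp only [pvCnt1, pvP, pvNeg, if_pos h2, if_neg h1]
          exact Prod.ext (by dsimp; ring) (by dsimp; ring)
        · rw [show pvStepB e (t, c) = (t, c) by simp [pvStepB, h1, h2], ih]
          simp [pvCnt1, pvP, pvNeg, h1, h2]

-- pulling the edge lookup out of A's fold (B materialises the mapped list)
lemma pvFoldA_map (l : List Int) (g : Int → Int) (a : Int × Int × Int) :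
    l.foldl (fun s y => pvStepA (g y) s) a = (l.map g).foldl (fun s e => pvStepA e s) a := by
  induction l generalizing a with
  | nil => rfl
  | cons e t ih => simp [ih]

-- A's fold-and-flush from (s0,0,0) equals s0 + pvP
lemma pvA_pass (l : List Int) (s0 : Int) :
    pvFlushA (l.foldl (fun s e => pvStepA e s) (s0, 0, 0)) = s0 + pvP l := by
  have h := pvFold_inv l (s0, 0, 0) (s0, 0) (by simp [pvInv])
  rw [pvFlush_eq _ _ h, pvFoldB_eq]
  ring

-- A's pass with the edge lookup fused into the fold, as A writes it
lemma pvA_pass' (l : List Int) (g : Int → Int) (s0 : Int) :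
    pvFlushA (l.foldl (fun s y => pvStepA (g y) s) (s0, 0, 0)) = s0 + pvP (l.map g) := by
  rw [pvFoldA_map, pvA_pass]

-- ===== VERDICT (by name: the statement is the Claim_ definition above) =====
theorem calculate_errors_local_spec : Claim_equal_calculate_errors_local := by
  intro pi adj x _ _
  unfold Spec_calculate_errors_local calculate_errors_local calculate_errors_local_alt
  dsimp only
  rw [pvA_pass', pvA_pass', pvPairsScan_eq, pvPairsScan_eq]
  ring
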